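-- pv_equiv track=rewrite | github.com/jpverkamp/takuzu | solvers/human.py | permute_nones
-- ===== SOURCE A (Python) =====
-- def permute_nones(ls):
--     '''Helper function to generate all permutations from filling in 0s and 1s into a list'''
--
--     if ls == []:
--         yield []
--     elif ls[0]:
--         for recur in permute_nones(ls[1:]):
--             yield [ls[0]] + recur
--     else:
--         for value in '01':
--             for recur in permute_nones(ls[1:]):
--                 yield [value] + recur
-- ===== SOURCE B (Python) =====
-- def permute_nones(ls):
--     '''Generate all fillings of the falsy slots with '0'/'1' by building the
--     combination table iteratively, then stamping each combination into a copy.'''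
--     slots = sum(1 for v in ls if not v)
--     combos = ['']
--     for _ in range(slots):
--         combos = [c + b for c in combos for b in '01']
--     for combo in combos:
--         it = iter(combo)
--         yield [v if v else next(it) for v in ls]
-- ===== Notes on version B (the rewrite author's own statement) =====
-- stated objective: alternative
-- what changed: Replaces A's branching recursion (which re-enumerates suffix fillings per branch) with an iterative construction: count the falsy slots, build the full table of 0/1 combinations with a loop, then stamp each combination into the list in one pass.
import Mathlib
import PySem

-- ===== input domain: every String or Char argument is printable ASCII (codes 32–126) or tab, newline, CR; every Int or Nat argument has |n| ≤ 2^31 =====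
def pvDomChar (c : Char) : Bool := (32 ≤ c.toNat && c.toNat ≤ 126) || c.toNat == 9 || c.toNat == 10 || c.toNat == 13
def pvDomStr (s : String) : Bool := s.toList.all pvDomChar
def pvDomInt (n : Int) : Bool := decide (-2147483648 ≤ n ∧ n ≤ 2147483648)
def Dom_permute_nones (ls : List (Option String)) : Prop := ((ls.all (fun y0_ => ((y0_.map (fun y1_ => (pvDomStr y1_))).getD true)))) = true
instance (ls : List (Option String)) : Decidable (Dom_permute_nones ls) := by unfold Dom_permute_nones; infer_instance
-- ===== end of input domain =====

-- B replaces A's branching recursion by an iterative table of 0/1 combinations stamped into the list (alternative decomposition, same cost).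

-- ===== PORT A =====
-- Python truthiness of a str-or-None element: None and "" are falsy.
def pyTruthy (v : Option String) : Bool :=
  match v with
  | none => false
  | some s => !(s == "")

def permute_nones (ls : List (Option String)) : List (List String) :=
  match ls with
  | [] => [[]]
  | v :: rest =>
    if pyTruthy v then
      (permute_nones rest).map (fun recur => v.getD "" :: recur)
    else
      ["0", "1"].flatMap (fun value => (permute_nones rest).map (fun recur => value :: recur))

-- ===== PORT B =====
-- one iteration of B's `combos = [c + b for c in combos for b in '01']`
def pvStepB (cs : List (List String)) : List (List String) :=
  cs.flatMap (fun c => ["0", "1"].map (fun b => c ++ [b]))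

-- B's `[v if v else next(it) for v in ls]`: walk ls consuming the combo at falsy slots
def pvFill : List (Option String) → List String → List String
  | [], _ => []
  | v :: rest, cs =>
    if pyTruthy v then v.getD "" :: pvFill rest cs
    else
      match cs with
      | c :: cs' => c :: pvFill rest cs'
      | [] => []   -- iterator exhausted; unreachable since each combo has length = slot count

def permute_nones_alt (ls : List (Option String)) : List (List String) :=
  let slots := (ls.filter (fun v => !pyTruthy v)).length
  let combos := (List.range slots).foldl (fun cs _ => pvStepB cs) [[]]
  combos.map (fun combo => pvFill ls combo)

-- ===== PRECONDITION & SPEC =====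
def Spec_permute_nones (ls : List (Option String)) (out : List (List String)) : Prop := out = permute_nones_alt ls
instance (ls : List (Option String)) (out : List (List String)) : Decidable (Spec_permute_nones ls out) := by unfold Spec_permute_nones; infer_instance

-- ===== CLAIM (what is proved, stated in full; the proofs are below) =====
def Claim_equal_permute_nones : Prop := ∀ (ls : List (Option String)), Dom_permute_nones ls → Spec_permute_nones ls (permute_nones ls)

-- ===== LEMMAS AND PROOFS =====

def pvCombos : Nat → List (List String)
  | 0 => [[]]
  | k + 1 => pvStepB (pvCombos k)

theorem pvCombos_foldl (n : Nat) :
    (List.range n).foldl (fun cs _ => pvStepB cs) [[]] = pvCombos n := by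
  induction n with
  | zero => rfl
  | succ k ih => simp [List.range_succ, List.foldl_append, ih, pvCombos]

theorem pvStepB_append (a b : List (List String)) :
    pvStepB (a ++ b) = pvStepB a ++ pvStepB b := by
  simp [pvStepB]

theorem pvStepB_map_cons (c : String) (s : List (List String)) :
    pvStepB (s.map (fun x => c :: x)) = (pvStepB s).map (fun x => c :: x) := by
  induction s with
  | nil => rfl
  | cons h t ih => simp [pvStepB] at ih ⊢; simp [ih]

theorem pvFill_truthy (v : Option String) (rest : List (Option String)) (cs : List String)
    (h : pyTruthy v = true) : pvFill (v :: rest) cs = v.getD "" :: pvFill rest cs := by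
  cases cs <;> simp [pvFill, h]

theorem pvFill_falsy (v : Option String) (rest : List (Option String)) (c : String)
    (cs : List String) (h : pyTruthy v = false) :
    pvFill (v :: rest) (c :: cs) = c :: pvFill rest cs := by
  simp [pvFill, h]

theorem pvCombos_head (k : Nat) :
    pvCombos (k + 1) =
      (pvCombos k).map (fun x => "0" :: x) ++ (pvCombos k).map (fun x => "1" :: x) := by
  induction k with
  | zero => rfl
  | succ m ih =>
    show pvStepB (pvCombos (m + 1)) = _
    conv_lhs => rw [ih]
    rw [pvStepB_append, pvStepB_map_cons, pvStepB_map_cons]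
    rfl

theorem permute_nones_eq_combos (ls : List (Option String)) :
    permute_nones ls =
      (pvCombos ((ls.filter (fun v => !pyTruthy v)).length)).map (pvFill ls) := by
  induction ls with
  | nil => rfl
  | cons v rest ih =>
    by_cases h : pyTruthy v = true
    · have hf : pvFill (v :: rest) = fun cs => v.getD "" :: pvFill rest cs :=
        funext fun cs => pvFill_truthy v rest cs h
      simp [permute_nones, h, ih, List.map_map, hf, Function.comp]
    · have h' : pyTruthy v = false := by simpa using h
      have hf : ∀ c : String,
          (pvFill (v :: rest)) ∘ (fun r => c :: r) = (fun r => c :: r) ∘ pvFill rest :=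
        fun c => funext fun cs => pvFill_falsy v rest c cs h'
      have hcnt : ((v :: rest).filter (fun v => !pyTruthy v)).length
          = (rest.filter (fun v => !pyTruthy v)).length + 1 := by
        simp [h']
      rw [hcnt, pvCombos_head]
      simp [permute_nones, h, ih, List.map_map, hf]

-- ===== VERDICT (by name: the statement is the Claim_ definition above) =====
theorem permute_nones_spec : Claim_equal_permute_nones := by
  intro ls _
  show permute_nones ls = permute_nones_alt ls
  rw [permute_nones_eq_combos]
  simp [permute_nones_alt, pvCombos_foldl]
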